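-- pv_equiv track=rewrite | github.com/kkr010128/codebert | problem285/problem285_135.py | rightless
-- ===== SOURCE A (Python) =====
-- def rightless(ln):
--     revl = reversed(ln)
--     ret = [0]
--     cur = 0
--     for c in revl:
--         if c == ">":
--             cur += 1
--         else:
--             cur = 0
--         ret.append(cur)
--     return list(reversed(ret))
-- ===== SOURCE B (Python) =====
-- def rightless(ln):
--     # forward run-length scan: each maximal run of '>' of length L contributes
--     # [L, L-1, ..., 1]; any other run contributes zeros; one trailing 0.
--     out = []
--     i = 0
--     n = len(ln)
--     while i < n:
--         j = i + 1
--         while j < n and ln[j] == ln[i]: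
--             j += 1
--         L = j - i
--         if ln[i] == ">":
--             out.extend(range(L, 0, -1))
--         else:
--             out.extend([0] * L)
--         i = j
--     out.append(0)
--     return out
-- ===== Notes on version B (the rewrite author's own statement) =====
-- stated objective: alternative
-- what changed: Replaced A's reversed-iteration running counter (append per element, then reverse) by a forward run-length scan that emits a whole descending block range(L,0,-1) per maximal '>'-run and [0]*L per other run, plus the trailing 0.
import Mathlib
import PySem

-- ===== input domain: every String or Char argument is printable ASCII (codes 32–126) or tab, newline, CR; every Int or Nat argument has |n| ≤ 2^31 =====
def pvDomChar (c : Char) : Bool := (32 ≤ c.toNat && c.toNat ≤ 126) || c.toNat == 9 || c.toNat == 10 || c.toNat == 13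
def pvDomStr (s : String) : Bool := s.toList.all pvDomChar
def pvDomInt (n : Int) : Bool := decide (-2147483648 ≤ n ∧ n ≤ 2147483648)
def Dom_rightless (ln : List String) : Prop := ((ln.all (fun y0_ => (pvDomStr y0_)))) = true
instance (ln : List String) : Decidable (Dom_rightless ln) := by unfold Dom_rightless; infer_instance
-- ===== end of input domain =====

-- B replaces A's reversed running-counter scan by a forward run-length scan (alternative decomposition, same O(n) cost).

-- ===== PORT A =====
-- A: ret = [0]; cur = 0; for c in reversed(ln): cur = cur+1 if c == ">" else 0; ret.append(cur); return list(reversed(ret))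
def rightless (ln : List String) : List Int :=
  (ln.reverse.foldl
    (fun (st : List Int × Int) c =>
      let cur := if c = ">" then st.2 + 1 else 0
      (st.1 ++ [cur], cur))
    ([0], 0)).1.reverse

-- ===== PORT B =====
-- B's outer while loop: each step consumes one maximal run (the inner while = takeWhile of equal elements)
-- and emits range(L, 0, -1) for a '>'-run, [0]*L otherwise.
def rightlessRuns : List String → List Int
  | [] => []
  | c :: rest =>
    let t := rest.takeWhile (fun x => x = c)   -- inner while: extend the run
    let L : Nat := t.length + 1
    (if c = ">" then PySem.List.pyRange (L : Int) 0 (-1) else List.replicate L 0)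
      ++ rightlessRuns (rest.dropWhile (fun x => x = c))
  termination_by l => l.length
  decreasing_by
    simp only [List.length_cons]
    exact Nat.lt_succ_of_le (List.length_dropWhile_le _ _)

def rightless_alt (ln : List String) : List Int :=
  rightlessRuns ln ++ [0]

-- ===== PRECONDITION & SPEC =====
def Spec_rightless (ln : List String) (out : List Int) : Prop := out = rightless_alt ln
instance (ln : List String) (out : List Int) : Decidable (Spec_rightless ln out) := by unfold Spec_rightless; infer_instance

-- ===== CLAIM (what is proved, stated in full; the proofs are below) =====
def Claim_equal_rightless : Prop := ∀ (ln : List String), Dom_rightless ln → Spec_rightless ln (rightless ln)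

-- ===== LEMMAS AND PROOFS =====

-- reference recursion: value at each position from the value to its right
def rrRef : List String → List Int
  | [] => [0]
  | c :: rest => (if c = ">" then (rrRef rest).headI + 1 else 0) :: rrRef rest

-- A side: the chain of `cur` values produced while scanning xs, and the final `cur`
def rrChain : Int → List String → List Int
  | _, [] => []
  | cur, c :: xs =>
    let cur' := if c = ">" then cur + 1 else 0
    cur' :: rrChain cur' xs

def rrLast : Int → List String → Int
  | cur, [] => cur
  | cur, c :: xs => rrLast (if c = ">" then cur + 1 else 0) xs

theorem foldl_eq_rrChain (xs : List String) (acc : List Int) (cur : Int) :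
    xs.foldl
      (fun (st : List Int × Int) c =>
        let cur := if c = ">" then st.2 + 1 else 0
        (st.1 ++ [cur], cur))
      (acc, cur)
    = (acc ++ rrChain cur xs, rrLast cur xs) := by
  induction xs generalizing acc cur with
  | nil => simp [rrChain, rrLast]
  | cons c xs ih => simp [rrChain, rrLast, ih]

theorem headI_append_of_ne_nil {l m : List Int} (h : l ≠ []) :
    (l ++ m).headI = l.headI := by
  cases l with
  | nil => exact absurd rfl h
  | cons a l => simp

theorem rrChain_append_singleton (ys : List String) (c : String) (cur : Int) :
    rrChain cur (ys ++ [c])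
      = rrChain cur ys ++ [if c = ">" then rrLast cur ys + 1 else 0] := by
  induction ys generalizing cur with
  | nil => simp [rrChain, rrLast]
  | cons d ys ih => simp [rrChain, rrLast, ih]

theorem rrLast_eq_headI (ys : List String) (cur : Int) :
    rrLast cur ys = ((rrChain cur ys).reverse ++ [cur]).headI := by
  induction ys generalizing cur with
  | nil => simp [rrChain, rrLast]
  | cons c ys ih =>
    simp only [rrChain, rrLast]
    rw [ih, List.reverse_cons]
    generalize (rrChain (if c = ">" then cur + 1 else 0) ys).reverse = L
    exact (headI_append_of_ne_nil (by simp)).symm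

theorem rightless_eq (ln : List String) :
    rightless ln = (rrChain 0 ln.reverse).reverse ++ [0] := by
  unfold rightless
  rw [foldl_eq_rrChain]
  simp

theorem rightless_cons (c : String) (rest : List String) :
    rightless (c :: rest)
      = (if c = ">" then (rightless rest).headI + 1 else 0) :: rightless rest := by
  rw [rightless_eq, rightless_eq]
  rw [show (c :: rest).reverse = rest.reverse ++ [c] by simp]
  rw [rrChain_append_singleton]
  rw [rrLast_eq_headI]
  simp

theorem rightless_eq_rrRef (ln : List String) : rightless ln = rrRef ln := by
  induction ln with
  | nil => simp [rightless, rrRef]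
  | cons c rest ih => rw [rightless_cons, rrRef, ih]

-- B side, non-'>' runs: every element of t is not ">"
theorem rrRef_zeros (t xs : List String) (ht : ∀ x ∈ t, x ≠ ">") :
    rrRef (t ++ xs) = List.replicate t.length 0 ++ rrRef xs := by
  induction t with
  | nil => simp
  | cons d t ih =>
    have hd : d ≠ ">" := ht d (by simp)
    simp only [List.cons_append, rrRef, if_neg hd, ih (fun x hx => ht x (by simp [hx])),
      List.length_cons, List.replicate_succ]

-- B side, '>' runs: a run of k '>'s prepends the countdown from v + k down to v + 1
theorem rrRef_gts (t xs : List String) (ht : ∀ x ∈ t, x = ">") :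
    rrRef (t ++ xs)
      = PySem.List.pyRange ((rrRef xs).headI + t.length) ((rrRef xs).headI) (-1)
        ++ rrRef xs := by
  induction t with
  | nil => simp [PySem.List.pyRange_neg_one_eq_nil]
  | cons d t ih =>
    have hd : d = ">" := ht d (by simp)
    have iht := ih (fun x hx => ht x (by simp [hx]))
    generalize hv : (rrRef xs).headI = v at iht ⊢
    have hhead : (rrRef (t ++ xs)).headI = v + t.length := by
      rw [iht]
      rcases Nat.eq_zero_or_pos t.length with h0 | hpos
      · rw [h0]
        rw [PySem.List.pyRange_neg_one_eq_nil (by simp)]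
        simp [hv]
      · rw [PySem.List.pyRange_neg_one_cons
              (show v < v + (t.length : Int) by omega)]
        simp
    simp only [List.cons_append, rrRef, if_pos hd, List.length_cons]
    rw [hhead, iht,
        PySem.List.pyRange_neg_one_cons
          (show v < v + (((t.length : Nat) + 1 : Nat) : Int) by push_cast; omega)]
    simp only [List.cons_append, List.cons.injEq]
    constructor
    · push_cast
      ring
    · congr 2
      push_cast
      ring

theorem headI_rrRef_dropWhile (rest : List String) :
    (rrRef (rest.dropWhile (fun x => x = ">"))).headI = 0 := by
  rcases hd : rest.dropWhile (fun x => x = ">") with _ | ⟨y, d⟩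
  · simp [rrRef]
  · have hy : ¬ (y = ">") := by
      have := List.head?_dropWhile_not (fun x => decide (x = ">")) rest
      rw [hd] at this
      simpa using this
    simp [rrRef, hy]

theorem rightless_alt_eq_rrRef (ln : List String) : rightless_alt ln = rrRef ln := by
  unfold rightless_alt
  induction ln using rightlessRuns.induct with
  | case1 => simp [rightlessRuns, rrRef]
  | case2 c rest ih =>
    rw [rightlessRuns]
    have hsplit : rest = rest.takeWhile (fun x => x = c) ++ rest.dropWhile (fun x => x = c) :=
      (List.takeWhile_append_dropWhile).symm
    by_cases hc : c = ">"
    · subst hc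
      have hz : (rrRef (rest.dropWhile (fun x => x = ">"))).headI = 0 :=
        headI_rrRef_dropWhile rest
      have hmem : ∀ x ∈ (">" : String) :: rest.takeWhile (fun x => x = ">"), x = ">" := by
        intro x hx
        rcases List.mem_cons.mp hx with h | h
        · exact h
        · have := List.mem_takeWhile_imp h; simpa using this
      have hg := rrRef_gts ((">" : String) :: rest.takeWhile (fun x => x = ">"))
        (rest.dropWhile (fun x => x = ">")) hmem
      rw [show (">" : String) :: rest = ((">" : String) :: rest.takeWhile (fun x => x = ">"))
            ++ rest.dropWhile (fun x => x = ">") by rw [List.cons_append, ← hsplit]]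
      rw [hg, hz, List.append_assoc, ih]
      simp
    · have hmem : ∀ x ∈ c :: rest.takeWhile (fun x => x = c), x ≠ ">" := by
        intro x hx
        rcases List.mem_cons.mp hx with h | h
        · rw [h]; exact hc
        · have := List.mem_takeWhile_imp h
          simp only [decide_eq_true_eq] at this
          rw [this]; exact hc
      have hzz := rrRef_zeros (c :: rest.takeWhile (fun x => x = c))
        (rest.dropWhile (fun x => x = c)) hmem
      rw [show c :: rest = (c :: rest.takeWhile (fun x => x = c))
            ++ rest.dropWhile (fun x => x = c) by rw [List.cons_append, ← hsplit]]
      rw [hzz, List.append_assoc, ih]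
      simp [if_neg hc]

-- ===== VERDICT (by name: the statement is the Claim_ definition above) =====
theorem rightless_spec : Claim_equal_rightless := by
  intro ln _
  unfold Spec_rightless
  rw [rightless_eq_rrRef, rightless_alt_eq_rrRef]
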